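-- pv_equiv track=rewrite | github.com/pret/pokefirered | .github/agents-meta/export_npc_type_levels.py | get_default_moves
-- ===== SOURCE A (Python) =====
-- def get_default_moves(species_id: int, level: int,
--                       learnsets: dict[int, list[tuple[int, int]]]) -> list[int]:
--     """Return up to 4 moves a Pokémon of this species knows at this level (last 4 <= level)."""
--     ls = learnsets.get(species_id, [])
--     known: list[int] = []
--     for lvl, mvid in ls:
--         if lvl <= level:
--             known.append(mvid)
--     # keep last 4
--     return known[-4:]
-- ===== SOURCE B (Python) =====
-- def get_default_moves(species_id: int, level: int,
--                       learnsets: dict[int, list[tuple[int, int]]]) -> list[int]: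
--     """Return up to 4 moves a Pokémon of this species knows at this level (last 4 <= level)."""
--     ls = learnsets.get(species_id, [])
--     buf: list[int] = []
--     for lvl, mvid in reversed(ls):
--         if lvl <= level:
--             buf.append(mvid)
--             if len(buf) == 4:
--                 break
--     buf.reverse()
--     return buf
-- ===== Notes on version B (the rewrite author's own statement) =====
-- stated objective: alternative
-- what changed: Backward scan over reversed(ls) with early break once 4 matches are gathered, then reversed back, instead of collecting all matching moves forward and slicing the last 4.
import Mathlib
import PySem

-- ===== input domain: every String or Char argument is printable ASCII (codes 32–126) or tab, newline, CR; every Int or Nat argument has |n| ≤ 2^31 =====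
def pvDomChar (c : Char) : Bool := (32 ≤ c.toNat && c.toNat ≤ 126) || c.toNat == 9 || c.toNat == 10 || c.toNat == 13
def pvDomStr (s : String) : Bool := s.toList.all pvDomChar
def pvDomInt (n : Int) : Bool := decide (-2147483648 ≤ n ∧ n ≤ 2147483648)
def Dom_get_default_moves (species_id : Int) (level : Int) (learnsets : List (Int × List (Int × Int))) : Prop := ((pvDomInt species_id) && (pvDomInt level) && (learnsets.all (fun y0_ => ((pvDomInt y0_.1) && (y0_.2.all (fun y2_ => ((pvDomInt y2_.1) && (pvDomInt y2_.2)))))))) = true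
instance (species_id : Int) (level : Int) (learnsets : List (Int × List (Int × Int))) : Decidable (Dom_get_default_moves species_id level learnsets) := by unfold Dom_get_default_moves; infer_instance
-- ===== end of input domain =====

-- B scans the learnset backwards and stops after gathering 4 matchedMoves, instead of
-- collecting all matching moves forward and slicing the last 4 (objective: alternative).

-- ===== PORT A =====
def get_default_moves (species_id : Int) (level : Int) (learnsets : List (Int × List (Int × Int))) : List Int :=
  let ls := PySem.Dict.getD (PySem.Dict.mk learnsets) species_id []
  let known := ls.foldl (fun (known : List Int) (p : Int × Int) => if p.1 ≤ level then known ++ [p.2] else known) []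
  PySem.List.slice known (some (-4)) none

-- ===== PORT B =====
-- the reversed-scan loop of Source B: append matchedMoves to buf, break once buf holds 4
def altLoop (level : Int) : List (Int × Int) → List Int → List Int
  | [], buf => buf
  | (l, m) :: rest, buf =>
    if l ≤ level then
      let buf' := buf ++ [m]
      if buf'.length = 4 then buf' else altLoop level rest buf'
    else altLoop level rest buf

def get_default_moves_alt (species_id : Int) (level : Int) (learnsets : List (Int × List (Int × Int))) : List Int :=
  let ls := PySem.Dict.getD (PySem.Dict.mk learnsets) species_id []
  (altLoop level ls.reverse []).reverse

-- ===== PRECONDITION & SPEC =====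
def Spec_get_default_moves (species_id : Int) (level : Int) (learnsets : List (Int × List (Int × Int))) (out : List Int) : Prop := out = get_default_moves_alt species_id level learnsets
instance (species_id : Int) (level : Int) (learnsets : List (Int × List (Int × Int))) (out : List Int) : Decidable (Spec_get_default_moves species_id level learnsets out) := by unfold Spec_get_default_moves; infer_instance

-- ===== CLAIM (what is proved, stated in full; the proofs are below) =====
def Claim_equal_get_default_moves : Prop := ∀ (species_id : Int) (level : Int) (learnsets : List (Int × List (Int × Int))), Dom_get_default_moves species_id level learnsets → Spec_get_default_moves species_id level learnsets (get_default_moves species_id level learnsets)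

-- ===== LEMMAS AND PROOFS =====

-- the matching move ids, in learnset order
def matchedMoves (level : Int) (ls : List (Int × Int)) : List Int :=
  ls.filterMap (fun p => if p.1 ≤ level then some p.2 else none)

theorem foldl_matches (level : Int) (ls : List (Int × Int)) (acc : List Int) :
    ls.foldl (fun (known : List Int) (p : Int × Int) => if p.1 ≤ level then known ++ [p.2] else known) acc
      = acc ++ matchedMoves level ls := by
  induction ls generalizing acc with
  | nil => simp [matchedMoves]
  | cons p rest ih =>
    simp only [List.foldl_cons, matchedMoves, List.filterMap_cons]
    split <;> simp [ih, matchedMoves]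

theorem altLoop_eq (level : Int) (ls : List (Int × Int)) (buf : List Int)
    (h : buf.length < 4) :
    altLoop level ls buf = buf ++ (matchedMoves level ls).take (4 - buf.length) := by
  induction ls generalizing buf with
  | nil => simp [altLoop, matchedMoves]
  | cons p rest ih =>
    obtain ⟨l, m⟩ := p
    simp only [altLoop]
    by_cases hl : l ≤ level
    · simp only [matchedMoves, List.filterMap_cons, if_pos hl]
      by_cases h4 : (buf ++ [m]).length = 4
      · simp only [if_pos h4]
        have : 4 - buf.length = 1 := by simp at h4; omega
        rw [this]
        simp
      · simp only [if_neg h4]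
        have hlen : (buf ++ [m]).length < 4 := by simp at h4 ⊢; omega
        rw [ih _ hlen]
        have : 4 - buf.length = (4 - (buf ++ [m]).length) + 1 := by
          simp at h4 ⊢; omega
        rw [this, List.take_succ_cons]
        simp [matchedMoves]
    · simp only [matchedMoves, List.filterMap_cons, if_neg hl]
      exact ih buf h

-- Python known[-4:] is the last min(4, len) elements
theorem lastFour (k : List Int) :
    PySem.List.slice k (some (-4)) none = ((k.reverse).take 4).reverse := by
  rw [PySem.List.slice_from_neg_ofNat k 4 (by omega), List.take_reverse, List.reverse_reverse]

-- ===== VERDICT (by name: the statement is the Claim_ definition above) =====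
theorem get_default_moves_spec : Claim_equal_get_default_moves := by
  intro species_id level learnsets _
  unfold Spec_get_default_moves get_default_moves get_default_moves_alt
  simp only
  rw [foldl_matches, List.nil_append, lastFour,
      altLoop_eq level _ [] (by simp)]
  simp [matchedMoves, List.filterMap_reverse]
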